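-- pv_equiv track=rewrite | github.com/ArkadyBIG/chequeProgram | Parser/default_parser_methods/parse_persons_data.py | _find_line_of_numbers
-- ===== SOURCE A (Python) =====
-- def _find_line_of_numbers(data):
--     lines = []
--     for i, text in enumerate(data['text']):
--         if text:
--             if i and data['text'][i - 1]:
--                 lines[-1].append(i)
--             else:
--                 lines.append([i])
--
--     if not lines:
--         return []
--     return lines
-- ===== SOURCE B (Python) =====
-- def _find_line_of_numbers(data):
--     texts = data['text']
--     n = len(texts)
--     lines = []
--     i = 0
--     while i < n:
--         if texts[i]:
--             j = i
--             while j < n and texts[j]: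
--                 j += 1
--             lines.append(list(range(i, j)))
--             i = j
--         else:
--             i += 1
--     return lines
-- ===== Notes on version B (the rewrite author's own statement) =====
-- stated objective: alternative
-- what changed: B scans the text list with a two-pointer while loop that finds each maximal run of truthy entries and emits it as list(range(i, j)) at once, instead of A's element-wise enumerate pass that looks back at text[i-1] to decide between appending the index to the last line and starting a new line.
import Mathlib
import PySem

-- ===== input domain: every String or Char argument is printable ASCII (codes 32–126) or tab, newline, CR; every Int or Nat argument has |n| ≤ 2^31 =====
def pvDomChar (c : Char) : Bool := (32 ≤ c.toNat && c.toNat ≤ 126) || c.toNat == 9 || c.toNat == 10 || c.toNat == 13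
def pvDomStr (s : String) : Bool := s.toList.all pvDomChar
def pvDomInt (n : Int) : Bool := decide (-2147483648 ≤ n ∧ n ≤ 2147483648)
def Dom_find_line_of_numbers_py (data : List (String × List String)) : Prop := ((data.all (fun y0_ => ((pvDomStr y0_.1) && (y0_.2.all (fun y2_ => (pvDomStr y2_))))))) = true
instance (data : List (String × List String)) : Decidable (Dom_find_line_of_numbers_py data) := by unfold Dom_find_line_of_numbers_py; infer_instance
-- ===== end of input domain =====

-- B replaces A's element-wise enumerate pass with predecessor look-back by a two-pointer
-- run scanner that emits each maximal truthy run as one range (objective: alternative).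


-- ===== PORT A =====
-- data['text']: first-match lookup in the association list
def getText? : List (String × List String) → Option (List String)
  | [] => none
  | (k, v) :: rest => if k = "text" then some v else getText? rest

-- body of A's for-loop: p = (i, text) from enumerate(data['text'])
def aStep (texts : List String) (lines : List (List Int)) (p : Int × String) : List (List Int) :=
  if p.2 ≠ "" then
    if p.1 ≠ 0 ∧ PySem.List.pyGetD texts (p.1 - 1) "" ≠ "" then
      lines.dropLast ++ [(lines.getLast?.getD []) ++ [p.1]]   -- lines[-1].append(i)
    else lines ++ [[p.1]]                                     -- lines.append([i])
  else lines

def find_line_of_numbers_py (data : List (String × List String)) : List (List Int) :=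
  let texts := (getText? data).getD []
  let lines := (PySem.List.enumerate texts 0).foldl (aStep texts) []
  if lines = [] then [] else lines

-- ===== PORT B =====
-- inner while loop: j = i; while j < n and texts[j]: j += 1
def runEnd (texts : List String) (n j : Nat) : Nat :=
  if h : j < n ∧ PySem.List.pyGetD texts (j : Int) "" ≠ "" then runEnd texts n (j + 1) else j
termination_by n - j
decreasing_by omega

theorem runEnd_ge (texts : List String) (n j : Nat) : j ≤ runEnd texts n j := by
  unfold runEnd
  split
  · exact le_trans (by omega) (runEnd_ge texts n (j + 1))
  · exact le_rfl
termination_by n - j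
decreasing_by omega

theorem runEnd_gt (texts : List String) (n j : Nat) (h1 : j < n)
    (h2 : PySem.List.pyGetD texts (j : Int) "" ≠ "") : j < runEnd texts n j := by
  rw [runEnd, dif_pos ⟨h1, h2⟩]
  exact lt_of_lt_of_le (by omega) (runEnd_ge texts n (j + 1))

-- outer while loop over i, accumulating lines
def bLoop (texts : List String) (n i : Nat) (lines : List (List Int)) : List (List Int) :=
  if h : i < n then
    if ht : PySem.List.pyGetD texts (i : Int) "" ≠ "" then
      bLoop texts n (runEnd texts n i)
        (lines ++ [PySem.List.pyRange (i : Int) ((runEnd texts n i : Nat) : Int) 1])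
    else bLoop texts n (i + 1) lines
  else lines
termination_by n - i
decreasing_by
  · have := runEnd_gt texts n i h ht; omega
  · omega

def find_line_of_numbers_py_alt (data : List (String × List String)) : List (List Int) :=
  let texts := (getText? data).getD []
  bLoop texts texts.length 0 []

-- ===== PRECONDITION & SPEC =====
-- Pre_ excludes exactly the inputs without a 'text' key, on which Python A raises KeyError.
def Pre_find_line_of_numbers_py (data : List (String × List String)) : Prop :=
  "text" ∈ data.map Prod.fst
instance (data : List (String × List String)) : Decidable (Pre_find_line_of_numbers_py data) := by unfold Pre_find_line_of_numbers_py; infer_instance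

def pvWitness_find_line_of_numbers_py : (List (String × List String)) := [("text", ["ab", "", "cd", "e"])]

def Spec_find_line_of_numbers_py (data : List (String × List String)) (out : List (List Int)) : Prop := out = find_line_of_numbers_py_alt data
instance (data : List (String × List String)) (out : List (List Int)) : Decidable (Spec_find_line_of_numbers_py data out) := by unfold Spec_find_line_of_numbers_py; infer_instance

-- ===== CLAIM (what is proved, stated in full; the proofs are below) =====
def Claim_equal_find_line_of_numbers_py : Prop := ∀ (data : List (String × List String)), Dom_find_line_of_numbers_py data → Pre_find_line_of_numbers_py data → Spec_find_line_of_numbers_py data (find_line_of_numbers_py data)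

-- ===== LEMMAS AND PROOFS =====
-- proof-only structural recursion: length of the leading truthy run
def runLen : List String → Nat
  | [] => 0
  | t :: ts => if t ≠ "" then runLen ts + 1 else 0

-- proof-only structural version of B: emit runs front to back
def go : List String → Int → List (List Int)
  | [], _ => []
  | t :: ts, idx =>
    if t ≠ "" then
      PySem.List.pyRange idx (idx + ((runLen ts + 1 : Nat) : Int)) 1 ::
        go (ts.drop (runLen ts)) (idx + ((runLen ts + 1 : Nat) : Int))
    else go ts (idx + 1)
termination_by l => l.length
decreasing_by
  all_goals simp only [List.length_drop, List.length_cons]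
  all_goals omega

-- merging continuation: current (still open) line cur, remaining texts, next index
def goM (cur : List Int) : List String → Int → List (List Int)
  | [], _ => [cur]
  | t :: ts, idx => if t ≠ "" then goM (cur ++ [idx]) ts (idx + 1) else cur :: go ts (idx + 1)

theorem goM_eq (rest : List String) : ∀ (cur : List Int) (idx : Int),
    goM cur rest idx =
      (cur ++ PySem.List.pyRange idx (idx + (runLen rest : Int)) 1) ::
        go (rest.drop (runLen rest)) (idx + (runLen rest : Int)) := by
  induction rest with
  | nil =>
      intro cur idx
      simp [goM, go, runLen, PySem.List.pyRange_one_eq_nil le_rfl]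
  | cons t ts ih =>
      intro cur idx
      by_cases h : t = ""
      · simp [goM, go, runLen, h, PySem.List.pyRange_one_eq_nil le_rfl]
      · have h0 : (0:Int) ≤ (runLen ts : Int) := Int.natCast_nonneg _
        have hlt : idx < idx + ((runLen ts : Int) + 1) := by omega
        have hr : ((runLen (t :: ts) : Nat) : Int) = (runLen ts : Int) + 1 := by
          simp [runLen, h]
        have hd : (t :: ts).drop (runLen (t :: ts)) = ts.drop (runLen ts) := by
          simp [runLen, h]
        rw [show goM cur (t :: ts) idx = goM (cur ++ [idx]) ts (idx + 1) from by
          simp [goM, h]]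
        rw [ih, hd, hr, PySem.List.pyRange_one_cons hlt]
        have harr : idx + 1 + (runLen ts : Int) = idx + ((runLen ts : Int) + 1) := by ring
        rw [harr]
        simp [List.append_assoc]

theorem go_cons_truthy (t : String) (ts : List String) (idx : Int) (ht : t ≠ "") :
    go (t :: ts) idx = goM [idx] ts (idx + 1) := by
  have h0 : (0:Int) ≤ (runLen ts : Int) := Int.natCast_nonneg _
  have hlt : idx < idx + ((runLen ts : Int) + 1) := by omega
  rw [goM_eq]
  have hc : ((runLen ts + 1 : Nat) : Int) = (runLen ts : Int) + 1 := by push_cast; ring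
  have harr : idx + 1 + (runLen ts : Int) = idx + ((runLen ts : Int) + 1) := by ring
  simp only [go, if_pos ht, hc]
  rw [harr, PySem.List.pyRange_one_cons hlt]
  simp

theorem getD_last (pre suf : List String) (h : pre ≠ []) :
    PySem.List.pyGetD (pre ++ suf) ((pre.length : Int) - 1) "" = pre.getLast?.getD "" := by
  have hlen : 1 ≤ pre.length := List.length_pos_of_ne_nil h
  have h1 : (0:Int) ≤ (pre.length : Int) - 1 := by omega
  have h2 : (pre.length : Int) - 1 < (((pre ++ suf).length : Nat) : Int) := by
    simp only [List.length_append]; push_cast; omega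
  have hcast : ((pre.length : Int) - 1) = ((pre.length - 1 : Nat) : Int) := by omega
  rw [hcast, PySem.List.pyGetD_natCast]
  rw [List.getD_eq_getElem _ _ (by simp only [List.length_append]; omega)]
  rw [List.getElem_append_left (by omega)]
  rw [List.getLast?_eq_some_getLast h]
  simp [List.getLast_eq_getElem]

theorem mainA (suf : List String) : ∀ (pre : List String) (acc : List (List Int)),
    ((pre.getLast?.getD "" = "") →
      (PySem.List.enumerate suf (pre.length : Int)).foldl (aStep (pre ++ suf)) acc
        = acc ++ go suf (pre.length : Int))
  ∧ (∀ l0 : List Int, pre.getLast?.getD "" ≠ "" →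
      (PySem.List.enumerate suf (pre.length : Int)).foldl (aStep (pre ++ suf)) (acc ++ [l0])
        = acc ++ goM l0 suf (pre.length : Int)) := by
  induction suf with
  | nil =>
      refine fun pre acc => ⟨fun _ => ?_, fun l0 _ => ?_⟩
      · simp [PySem.List.enumerate_nil, go]
      · simp [PySem.List.enumerate_nil, goM]
  | cons t ts ih =>
      intro pre acc
      have hlen : ((pre ++ [t]).length : Int) = (pre.length : Int) + 1 := by
        simp
      have happ : (pre ++ [t]) ++ ts = pre ++ (t :: ts) := by simp
      constructor
      · intro hpre
        rw [PySem.List.enumerate_cons, List.foldl_cons]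
        by_cases ht : t = ""
        · have hstep : aStep (pre ++ (t :: ts)) acc ((pre.length : Int), t) = acc := by
            simp [aStep, ht]
          rw [hstep]
          have h1 := (ih (pre ++ [t]) acc).1 (by simp [ht])
          rw [happ, hlen] at h1
          rw [h1]
          have hgo : go (t :: ts) (pre.length : Int) = go ts ((pre.length : Int) + 1) := by
            simp [go, ht]
          rw [hgo]
        · have hcond : ¬((pre.length : Int) ≠ 0 ∧
              PySem.List.pyGetD (pre ++ (t :: ts)) ((pre.length : Int) - 1) "" ≠ "") := by
            rcases eq_or_ne pre [] with hp | hp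
            · simp [hp]
            · rw [getD_last pre (t :: ts) hp]
              simp [hpre]
          have hstep : aStep (pre ++ (t :: ts)) acc ((pre.length : Int), t)
              = acc ++ [[(pre.length : Int)]] := by
            simp [aStep, ht]
            intro hp hx
            exact absurd ⟨by have := List.length_pos_of_ne_nil hp; omega, hx⟩ hcond
          rw [hstep]
          have h2 := (ih (pre ++ [t]) acc).2 [(pre.length : Int)]
            (by simp; exact ht)
          rw [happ, hlen] at h2
          rw [h2, go_cons_truthy t ts _ ht]
      · intro l0 hpre
        have hp : pre ≠ [] := by
          intro e; subst e; simp at hpre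
        rw [PySem.List.enumerate_cons, List.foldl_cons]
        by_cases ht : t = ""
        · have hstep : aStep (pre ++ (t :: ts)) (acc ++ [l0]) ((pre.length : Int), t)
              = acc ++ [l0] := by
            simp [aStep, ht]
          rw [hstep]
          have h1 := (ih (pre ++ [t]) (acc ++ [l0])).1 (by simp [ht])
          rw [happ, hlen] at h1
          rw [h1]
          have hgoM : goM l0 (t :: ts) (pre.length : Int)
              = l0 :: go ts ((pre.length : Int) + 1) := by
            simp [goM, ht]
          rw [hgoM]
          simp [List.append_assoc]
        · have hne : ((pre.length : Int)) ≠ 0 := by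
            have := List.length_pos_of_ne_nil hp
            omega
          have hgd : PySem.List.pyGetD (pre ++ (t :: ts)) ((pre.length : Int) - 1) "" ≠ "" := by
            rw [getD_last pre _ hp]; exact hpre
          have hstep : aStep (pre ++ (t :: ts)) (acc ++ [l0]) ((pre.length : Int), t)
              = acc ++ [l0 ++ [(pre.length : Int)]] := by
            simp [aStep, ht, hgd]
            exact hp
          rw [hstep]
          have h2 := (ih (pre ++ [t]) acc).2 (l0 ++ [(pre.length : Int)])
            (by simp; exact ht)
          rw [happ, hlen] at h2
          rw [h2]
          have hgoM : goM l0 (t :: ts) (pre.length : Int)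
              = goM (l0 ++ [(pre.length : Int)]) ts ((pre.length : Int) + 1) := by
            simp [goM, ht]
          rw [hgoM]

theorem runEnd_eq (texts : List String) (j : Nat) :
    runEnd texts texts.length j = j + runLen (texts.drop j) := by
  rw [runEnd]
  split
  · next hcond =>
      obtain ⟨h1, h2⟩ := hcond
      have hget : PySem.List.pyGetD texts (j : Int) "" = texts[j] := by
        rw [PySem.List.pyGetD_natCast]; exact List.getD_eq_getElem texts "" h1
      have hd : texts.drop j = texts[j] :: texts.drop (j + 1) := List.drop_eq_getElem_cons h1
      have htj : texts[j] ≠ "" := by rwa [hget] at h2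
      rw [runEnd_eq texts (j + 1), hd]
      simp [runLen, htj]
      omega
  · next hcond =>
      by_cases h1 : j < texts.length
      · have h2 : PySem.List.pyGetD texts (j : Int) "" = "" := by
          by_contra hx; exact hcond ⟨h1, hx⟩
        have hget : PySem.List.pyGetD texts (j : Int) "" = texts[j] := by
          rw [PySem.List.pyGetD_natCast]; exact List.getD_eq_getElem texts "" h1
        have htj : texts[j] = "" := by rw [← hget, h2]
        rw [List.drop_eq_getElem_cons h1]
        simp [runLen, htj]
      · have hnil : texts.drop j = [] := List.drop_eq_nil_of_le (by omega)
        simp [hnil, runLen]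
termination_by texts.length - j
decreasing_by omega

theorem bLoop_eq (texts : List String) (i : Nat) (lines : List (List Int)) :
    bLoop texts texts.length i lines = lines ++ go (texts.drop i) (i : Int) := by
  rw [bLoop]
  split
  · next h =>
      split
      · next ht =>
          have hget : PySem.List.pyGetD texts (i : Int) "" = texts[i] := by
            rw [PySem.List.pyGetD_natCast]; exact List.getD_eq_getElem texts "" h
          have hd : texts.drop i = texts[i] :: texts.drop (i + 1) := List.drop_eq_getElem_cons h
          have htj : texts[i] ≠ "" := by rwa [hget] at ht
          have hrl : runLen (texts.drop i) = runLen (texts.drop (i + 1)) + 1 := by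
            rw [hd]; simp [runLen, htj]
          have hre : runEnd texts texts.length i = i + runLen (texts.drop i) := runEnd_eq texts i
          rw [hre, bLoop_eq texts (i + runLen (texts.drop i)), hrl]
          conv_rhs => rw [hd]
          have hgo : go (texts[i] :: texts.drop (i + 1)) (i : Int)
              = PySem.List.pyRange (i : Int)
                  ((i : Int) + ((runLen (texts.drop (i + 1)) + 1 : Nat) : Int)) 1 ::
                go ((texts.drop (i + 1)).drop (runLen (texts.drop (i + 1))))
                  ((i : Int) + ((runLen (texts.drop (i + 1)) + 1 : Nat) : Int)) := by
            simp only [go, if_pos htj]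
          rw [hgo, List.drop_drop]
          have e2 : i + 1 + runLen (texts.drop (i + 1))
              = i + (runLen (texts.drop (i + 1)) + 1) := by omega
          rw [e2]
          have e1 : ((i + (runLen (texts.drop (i + 1)) + 1) : Nat) : Int)
              = (i : Int) + ((runLen (texts.drop (i + 1)) + 1 : Nat) : Int) := by
            push_cast; ring
          rw [e1]
          simp [List.append_assoc]
      · next ht =>
          have hget : PySem.List.pyGetD texts (i : Int) "" = texts[i] := by
            rw [PySem.List.pyGetD_natCast]; exact List.getD_eq_getElem texts "" h
          have htj : texts[i] = "" := by
            by_contra hx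
            exact ht (by rw [hget]; exact hx)
          rw [bLoop_eq texts (i + 1)]
          have hd : texts.drop i = texts[i] :: texts.drop (i + 1) := List.drop_eq_getElem_cons h
          conv_rhs => rw [hd]
          have : go (texts[i] :: texts.drop (i + 1)) (i : Int)
              = go (texts.drop (i + 1)) ((i : Int) + 1) := by
            simp [go, htj]
          rw [this]
          push_cast
          rfl
  · next h =>
      have hnil : texts.drop i = [] := List.drop_eq_nil_of_le (by omega)
      simp [hnil, go]
termination_by texts.length - i
decreasing_by all_goals omega

-- ===== VERDICT (by name: the statement is the Claim_ definition above) =====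
theorem find_line_of_numbers_py_spec : Claim_equal_find_line_of_numbers_py := by
  intro data _ _
  simp only [Spec_find_line_of_numbers_py, find_line_of_numbers_py, find_line_of_numbers_py_alt]
  have hA := ((mainA ((getText? data).getD []) [] []).1 (by simp))
  simp only [List.nil_append, List.length_nil, Nat.cast_zero] at hA
  rw [hA, bLoop_eq]
  simp only [List.drop_zero, Nat.cast_zero, List.nil_append]
  split
  · next h => exact h.symm
  · rfl
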